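-- pv_equiv track=rewrite | github.com/pypi-data/pypi-mirror-362 | packages/apollog/apollog-0.1.1.tar.gz/apollog-0.1.1/controlPlane/notificationEngine/notificationService.py | group_logs_by_service
-- ===== SOURCE A (Python) =====
-- from collections import defaultdict
--
-- def group_logs_by_service(logs):
--     all_logs = []
--
--     for block in logs:
--         all_logs.extend(block["logs"])
--
--
--     logs_by_service = defaultdict(list)
--
--     for log in all_logs:
--         logs_by_service[log["service"]].append(log)
--
--
--
--     for service in logs_by_service.keys():
--         logs_by_service[service] = sorted(logs_by_service[service], key= lambda x : x['timestamp'])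
--
--     return logs_by_service
-- ===== SOURCE B (Python) =====
-- def group_logs_by_service(logs):
--     # Flatten once, sort the whole flat list once (stable) by timestamp,
--     # then bucket in a single pass; keys are pre-seeded in first-appearance
--     # order so the returned dict's key order matches the grouped-then-sorted
--     # approach.
--     flat = [log for block in logs for log in block["logs"]]
--     grouped = {log["service"]: [] for log in flat}
--     for log in sorted(flat, key=lambda x: x["timestamp"]):
--         grouped[log["service"]].append(log)
--     return grouped
-- ===== Notes on version B (the rewrite author's own statement) =====
-- stated objective: alternative
-- what changed: A groups the flattened logs by service first and then sorts each bucket separately; B sorts the whole flattened list once (stable, by timestamp) and buckets it in a single pass over a dict pre-seeded with services in first-appearance order.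
import Mathlib
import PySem

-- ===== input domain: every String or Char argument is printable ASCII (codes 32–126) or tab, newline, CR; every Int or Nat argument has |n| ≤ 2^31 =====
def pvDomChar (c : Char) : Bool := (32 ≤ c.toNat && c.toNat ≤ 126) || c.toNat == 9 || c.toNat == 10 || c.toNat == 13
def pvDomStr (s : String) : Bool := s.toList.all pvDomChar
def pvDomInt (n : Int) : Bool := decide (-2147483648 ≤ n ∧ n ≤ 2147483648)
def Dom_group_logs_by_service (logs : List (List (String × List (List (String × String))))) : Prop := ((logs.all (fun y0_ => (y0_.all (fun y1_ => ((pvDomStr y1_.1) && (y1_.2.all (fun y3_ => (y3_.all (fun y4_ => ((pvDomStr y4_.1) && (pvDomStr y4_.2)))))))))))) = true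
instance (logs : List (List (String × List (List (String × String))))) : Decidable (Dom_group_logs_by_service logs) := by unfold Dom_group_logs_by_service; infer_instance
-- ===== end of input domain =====

-- B flattens all blocks, sorts the flat list ONCE (stable, by timestamp) and buckets it in a
-- single pass over a pre-seeded dict, replacing A's group-then-sort-each-bucket decomposition.


-- ===== PORT A =====
def group_logs_by_service (logs : List (List (String × List (List (String × String))))) : List (String × List (List (String × String))) :=
  -- all_logs = []; for block in logs: all_logs.extend(block["logs"])
  let all_logs := logs.foldl (fun acc block => acc ++ ((List.lookup "logs" block).getD [])) []
  -- logs_by_service = defaultdict(list); for log in all_logs: logs_by_service[log["service"]].append(log)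
  let lbs := all_logs.foldl
    (fun d log => d.modify ((List.lookup "service" log).getD "") [] (fun ls => ls ++ [log]))
    PySem.Dict.empty
  -- for service in logs_by_service.keys(): logs_by_service[service] = sorted(…, key=λx. x['timestamp'])
  let lbs2 := lbs.keys.foldl
    (fun d s => d.insert s (PySem.List.sorted (d.getD s []) (fun log => (List.lookup "timestamp" log).getD "")))
    lbs
  lbs2.items

-- ===== PORT B =====
def group_logs_by_service_alt (logs : List (List (String × List (List (String × String))))) : List (String × List (List (String × String))) :=
  -- flat = [log for block in logs for log in block["logs"]]
  let flat := logs.flatMap (fun block => (List.lookup "logs" block).getD [])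
  -- grouped = {log["service"]: [] for log in flat}
  let grouped := flat.foldl (fun d log => d.insert ((List.lookup "service" log).getD "") []) PySem.Dict.empty
  -- for log in sorted(flat, key=λx. x["timestamp"]): grouped[log["service"]].append(log)
  let grouped2 := (PySem.List.sorted flat (fun log => (List.lookup "timestamp" log).getD "")).foldl
    (fun d log => d.modify ((List.lookup "service" log).getD "") [] (fun ls => ls ++ [log]))
    grouped
  grouped2.items

-- ===== PRECONDITION & SPEC =====
-- Pre_ excludes exactly the inputs where Python A raises KeyError: a block without the key
-- "logs", or a log record without the key "service" or "timestamp".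
def Pre_group_logs_by_service (logs : List (List (String × List (List (String × String))))) : Prop :=
  ∀ block ∈ logs, (List.lookup "logs" block).isSome = true ∧
    ∀ log ∈ (List.lookup "logs" block).getD [],
      (List.lookup "service" log).isSome = true ∧ (List.lookup "timestamp" log).isSome = true
instance (logs : List (List (String × List (List (String × String))))) : Decidable (Pre_group_logs_by_service logs) := by unfold Pre_group_logs_by_service; infer_instance

def pvWitness_group_logs_by_service : (List (List (String × List (List (String × String))))) :=
  [[("logs", [[("service", "a"), ("timestamp", "2")], [("service", "a"), ("timestamp", "1")]])],
   [("logs", [[("service", "b"), ("timestamp", "0")]])]]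

def Spec_group_logs_by_service (logs : List (List (String × List (List (String × String))))) (out : List (String × List (List (String × String)))) : Prop := out = group_logs_by_service_alt logs
instance (logs : List (List (String × List (List (String × String))))) (out : List (String × List (List (String × String)))) : Decidable (Spec_group_logs_by_service logs out) := by unfold Spec_group_logs_by_service; infer_instance

-- ===== CLAIM (what is proved, stated in full; the proofs are below) =====
def Claim_equal_group_logs_by_service : Prop := ∀ (logs : List (List (String × List (List (String × String))))), Dom_group_logs_by_service logs → Pre_group_logs_by_service logs → Spec_group_logs_by_service logs (group_logs_by_service logs)

-- ===== LEMMAS AND PROOFS =====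

theorem insertBy_of_forall_before {α : Type} (bf : α → α → Bool) (x : α) (zs : List α)
    (h : ∀ z ∈ zs, bf x z = true) : PySem.List.insertBy bf x zs = x :: zs := by
  cases zs with
  | nil => rfl
  | cons y ys => simp [PySem.List.insertBy, h y (by simp)]

theorem pairwise_insertBy {α κ : Type} [LinearOrder κ] (key : α → κ) (x : α) (ys : List α)
    (h : ys.Pairwise (fun a b => key a ≤ key b)) :
    (PySem.List.insertBy (fun a b => decide (key a < key b)) x ys).Pairwise (fun a b => key a ≤ key b) := by
  induction ys with
  | nil => simp [PySem.List.insertBy]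
  | cons y ys ih =>
    rw [List.pairwise_cons] at h
    by_cases hxy : key x < key y
    · simp only [PySem.List.insertBy, hxy, decide_true, if_true]
      refine List.pairwise_cons.2 ⟨?_, List.pairwise_cons.2 ⟨h.1, h.2⟩⟩
      intro z hz
      rcases List.mem_cons.1 hz with rfl | hz
      · exact le_of_lt hxy
      · exact le_trans (le_of_lt hxy) (h.1 z hz)
    · simp only [PySem.List.insertBy, hxy, decide_false]
      refine List.pairwise_cons.2 ⟨?_, ih h.2⟩
      intro z hz
      rw [PySem.List.mem_insertBy] at hz
      rcases hz with rfl | hz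
      · exact le_of_not_gt hxy
      · exact h.1 z hz

theorem filter_insertBy {α κ : Type} [LinearOrder κ] (key : α → κ) (p : α → Bool) (x : α) (ys : List α)
    (h : ys.Pairwise (fun a b => key a ≤ key b)) :
    (PySem.List.insertBy (fun a b => decide (key a < key b)) x ys).filter p =
      if p x then PySem.List.insertBy (fun a b => decide (key a < key b)) x (ys.filter p) else ys.filter p := by
  induction ys with
  | nil => cases hx : p x <;> simp [PySem.List.insertBy, hx]
  | cons y ys ih =>
    rw [List.pairwise_cons] at h
    by_cases hxy : key x < key y
    · simp only [PySem.List.insertBy, hxy, decide_true, if_true]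
      cases hx : p x with
      | true =>
        have : PySem.List.insertBy (fun a b => decide (key a < key b)) x ((y :: ys).filter p) = x :: (y :: ys).filter p := by
          apply insertBy_of_forall_before
          intro z hz
          have hz' := List.mem_of_mem_filter hz
          rcases List.mem_cons.1 hz' with rfl | hz'
          · simp [hxy]
          · simp [lt_of_lt_of_le hxy (h.1 z hz')]
        simp [this, hx]
      | false => simp [hx]
    · have hstep : PySem.List.insertBy (fun a b => decide (key a < key b)) x (y :: ys)
          = y :: PySem.List.insertBy (fun a b => decide (key a < key b)) x ys := by
        simp [PySem.List.insertBy, hxy]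
      rw [hstep, List.filter_cons, List.filter_cons, ih h.2]
      cases hy : p y with
      | true =>
        cases hx : p x with
        | true => simp [PySem.List.insertBy, hxy]
        | false => simp
      | false => cases hx : p x <;> simp

theorem foldl_insertBy_filter {α κ : Type} [LinearOrder κ] (key : α → κ) (p : α → Bool) (xs : List α) :
    ∀ acc : List α, acc.Pairwise (fun a b => key a ≤ key b) →
      (xs.foldl (fun acc x => PySem.List.insertBy (fun a b => decide (key a < key b)) x acc) acc).filter p =
        (xs.filter p).foldl (fun acc x => PySem.List.insertBy (fun a b => decide (key a < key b)) x acc) (acc.filter p) := by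
  induction xs with
  | nil => intro acc _; rfl
  | cons x xs ih =>
    intro acc hacc
    rw [List.foldl_cons, ih _ (pairwise_insertBy key x acc hacc), filter_insertBy key p x acc hacc,
      List.filter_cons]
    cases hx : p x <;> simp

theorem sorted_filter_comm {α κ : Type} [LinearOrder κ] (key : α → κ) (p : α → Bool) (xs : List α) :
    PySem.List.sorted (xs.filter p) key = (PySem.List.sorted xs key).filter p := by
  rw [PySem.List.sorted_eq_foldl_insertBy, PySem.List.sorted_eq_foldl_insertBy,
    foldl_insertBy_filter key p xs [] (by simp)]
  rfl

theorem contains_iff_mem_keys {κ ν : Type} [BEq κ] [LawfulBEq κ] (d : PySem.Dict κ ν) (k : κ) :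
    d.contains k = true ↔ k ∈ d.keys := by
  simp [PySem.Dict.contains, PySem.Dict.keys, List.any_eq_true]

theorem keys_insert_of_mem {κ ν : Type} [BEq κ] [LawfulBEq κ] (d : PySem.Dict κ ν) (k : κ) (v : ν)
    (h : k ∈ d.keys) : (d.insert k v).keys = d.keys := by
  have hc : d.contains k = true := (contains_iff_mem_keys d k).2 h
  simp only [PySem.Dict.insert, hc, if_true, PySem.Dict.keys, List.map_map]
  apply List.map_congr_left
  intro p _
  by_cases hp : p.1 = k
  · simp [hp]
  · simp [hp]

theorem phase3_keys {κ ν : Type} [BEq κ] [LawfulBEq κ] (F : PySem.Dict κ ν → κ → ν) (K : List κ) :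
    ∀ (d : PySem.Dict κ ν), (∀ s ∈ K, s ∈ d.keys) →
      (K.foldl (fun d s => d.insert s (F d s)) d).keys = d.keys := by
  induction K with
  | nil => intro d _; rfl
  | cons s K ih =>
    intro d h
    have hs : s ∈ d.keys := h s (by simp)
    have hk : (d.insert s (F d s)).keys = d.keys := keys_insert_of_mem d s _ hs
    rw [List.foldl_cons, ih _ (by intro t ht; rw [hk]; exact h t (by simp [ht])), hk]

theorem phase3_getD {κ ν : Type} [BEq κ] [LawfulBEq κ] (F : ν → ν) (dflt : ν) (K : List κ) :
    ∀ (d : PySem.Dict κ ν) (c : κ), K.Nodup →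
      (K.foldl (fun d s => d.insert s (F (d.getD s dflt))) d).getD c dflt =
        if c ∈ K then F (d.getD c dflt) else d.getD c dflt := by
  induction K with
  | nil => intro d c _; simp
  | cons s K ih =>
    intro d c hn
    rw [List.nodup_cons] at hn
    rw [List.foldl_cons, ih _ _ hn.2]
    by_cases hcK : c ∈ K
    · have hcs : c ≠ s := fun he => hn.1 (he ▸ hcK)
      simp [hcK, hcs, PySem.Dict.getD_insert_of_ne d _ dflt hcs]
    · by_cases hcs : c = s
      · subst hcs
        simp [hcK, PySem.Dict.getD_insert_self]
      · simp [hcK, hcs, PySem.Dict.getD_insert_of_ne d _ dflt hcs]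

theorem get?_eq_some_getD {κ ν : Type} [BEq κ] [LawfulBEq κ] (d : PySem.Dict κ ν) (k : κ) (dflt : ν)
    (h : k ∈ d.keys) : d.get? k = some (d.getD k dflt) := by
  have : ∃ v, d.get? k = some v := by
    rcases ho : d.get? k with _ | v
    · rw [PySem.Dict.get?_eq_none_iff_contains] at ho
      rw [← contains_iff_mem_keys d k] at h
      rw [h] at ho; cases ho
    · exact ⟨v, rfl⟩
  rcases this with ⟨v, hv⟩
  rw [hv, PySem.Dict.getD, hv]
  rfl

theorem assoc_eq {ν : Type} (l : List (String × ν)) :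
    ∀ l' : List (String × ν),
    (l.map Prod.fst = l'.map Prod.fst) → ((l.map Prod.fst).Nodup) →
    (∀ k ∈ l.map Prod.fst,
      (List.find? (fun p => p.1 == k) l).map Prod.snd = (List.find? (fun p => p.1 == k) l').map Prod.snd) →
    l = l' := by
  induction l with
  | nil =>
    intro l' hk _ _
    cases l' with
    | nil => rfl
    | cons p l' => simp at hk
  | cons p l ih =>
    intro l' hk hn hv
    cases l' with
    | nil => simp at hk
    | cons q l'' =>
      simp only [List.map_cons, List.cons.injEq] at hk
      simp only [List.map_cons] at hn
      rw [List.nodup_cons] at hn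
      have hpq : p.2 = q.2 := by
        have := hv p.1 (by simp)
        simp [hk.1] at this
        exact this
      have htail : l = l'' := by
        apply ih l'' hk.2 hn.2
        intro k hkmem
        have hne : p.1 ≠ k := fun he => hn.1 (he ▸ hkmem)
        have := hv k (by simp [hkmem])
        simpa [List.find?_cons, beq_iff_eq, hne, hk.1 ▸ hne] using this
      have : p = q := Prod.ext (hk.1) hpq
      rw [this, htail]

theorem dict_eq_of_keys_get? {ν : Type} (d d' : PySem.Dict String ν)
    (hk : d.keys = d'.keys) (hn : d.keys.Nodup)
    (hv : ∀ k ∈ d.keys, d.get? k = d'.get? k) : d = d' := by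
  apply PySem.Dict.ext
  apply assoc_eq d.items d'.items hk hn
  intro k hkm
  have := hv k hkm
  simpa [PySem.Dict.get?] using this

theorem getD_group {β : Type} (key : β → String) (l : List β) (d : PySem.Dict String (List β)) (c : String) :
    (l.foldl (fun d x => d.modify (key x) [] (fun ls => ls ++ [x])) d).getD c [] =
      d.getD c [] ++ l.filter (fun x => key x == c) := by
  have h1 : l.foldl (fun d x => d.modify (key x) [] (fun ls => ls ++ [x])) d
      = (l.map (fun x => (key x, x))).foldl (fun d p => d.modify p.1 [] (fun ls => ls ++ [p.2])) d := by
    rw [List.foldl_map]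
  rw [h1, PySem.Dict.getD_foldl_modify_append, List.filter_map, List.map_map]
  simp [Function.comp_def]

theorem getD_seed_nil {β : Type} (key : β → String) (l : List β) :
    ∀ (d : PySem.Dict String (List β)), (∀ c, d.getD c [] = []) →
      ∀ c, (l.foldl (fun d x => d.insert (key x) []) d).getD c [] = [] := by
  induction l with
  | nil => intro d h c; exact h c
  | cons x l ih =>
    intro d h c
    rw [List.foldl_cons]
    apply ih
    intro c'
    by_cases hc : c' = key x
    · subst hc; exact PySem.Dict.getD_insert_self d _ _ _
    · rw [PySem.Dict.getD_insert_of_ne d _ _ hc]; exact h c'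

theorem update_of_subset {α : Type} [BEq α] [LawfulBEq α] (s : PySem.Set α) (xs : List α)
    (h : ∀ x ∈ xs, x ∈ s) : PySem.Set.update s xs = s := by
  rw [PySem.Set.update_eq_append_filter]
  have : List.filter (fun y => !s.contains y) (PySem.Set.ofList xs) = [] := by
    rw [List.filter_eq_nil_iff]
    intro y hy
    have : y ∈ s := h y ((PySem.Set.mem_ofList xs y).1 hy)
    simp [PySem.Set.contains, this]
  rw [this, List.append_nil]


-- ===== VERDICT (by name: the statement is the Claim_ definition above) =====
theorem group_logs_by_service_spec : Claim_equal_group_logs_by_service := by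
  intro logs _ _
  unfold Spec_group_logs_by_service
  unfold group_logs_by_service group_logs_by_service_alt
  simp only [PySem.List.foldl_append_eq_flatMap, List.nil_append]
  set svc : List (String × String) → String := fun log => (List.lookup "service" log).getD "" with hsvc
  set ts : List (String × String) → String := fun log => (List.lookup "timestamp" log).getD "" with hts
  set flat := logs.flatMap (fun block => (List.lookup "logs" block).getD []) with hflat
  set dA := flat.foldl (fun d log => d.modify (svc log) [] (fun ls => ls ++ [log])) PySem.Dict.empty with hdA
  set d0 := flat.foldl (fun d log => d.insert (svc log) []) PySem.Dict.empty with hd0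
  set dB := (PySem.List.sorted flat ts).foldl (fun d log => d.modify (svc log) [] (fun ls => ls ++ [log])) d0 with hdB
  set dA2 := dA.keys.foldl (fun d s => d.insert s (PySem.List.sorted (d.getD s []) ts)) dA with hdA2
  show dA2.items = dB.items
  refine congrArg PySem.Dict.items ?_
  have hkeysA : dA.keys = PySem.Set.ofList (flat.map svc) := by
    rw [hdA, PySem.Dict.keys_foldl_modify_key flat svc [] (fun d log => fun ls => ls ++ [log]) PySem.Dict.empty]
    rfl
  have hnodA : dA.keys.Nodup := by
    rw [hdA]
    exact PySem.Dict.nodup_keys_foldl_modify_key flat svc [] _ _ (by simp [PySem.Dict.empty, PySem.Dict.keys])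
  have hkeys0 : d0.keys = PySem.Set.ofList (flat.map svc) := by
    rw [hd0, PySem.Dict.keys_foldl_insert_key flat svc (fun _ _ => []) PySem.Dict.empty]
    rfl
  have hkeysB : dB.keys = d0.keys := by
    rw [hdB, PySem.Dict.keys_foldl_modify_key]
    apply update_of_subset
    intro x hx
    simp only [List.mem_map] at hx
    obtain ⟨log, hlog, rfl⟩ := hx
    have hmem : log ∈ flat := (PySem.List.sorted_perm flat ts false).mem_iff.1 hlog
    rw [hkeys0]
    exact (PySem.Set.mem_ofList _ _).2 (List.mem_map_of_mem hmem)
  have hkeysA2 : dA2.keys = dA.keys := by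
    rw [hdA2]
    exact phase3_keys (fun d s => PySem.List.sorted (d.getD s []) ts) dA.keys dA (fun s hs => hs)
  have hnod0 : d0.keys.Nodup := by rw [hkeys0]; exact PySem.Set.nodup_ofList _
  have hnodB : dB.keys.Nodup := by
    rw [hdB]; exact PySem.Dict.nodup_keys_foldl_modify_key _ svc [] _ _ hnod0
  apply dict_eq_of_keys_get?
  · rw [hkeysA2, hkeysA, hkeysB, hkeys0]
  · rw [hkeysA2]; exact hnodA
  · intro k hk
    have hkA : k ∈ dA.keys := by rwa [hkeysA2] at hk
    have hkB : k ∈ dB.keys := by rw [hkeysB, hkeys0, ← hkeysA]; exact hkA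
    rw [get?_eq_some_getD dA2 k [] hk, get?_eq_some_getD dB k [] hkB]
    congr 1
    have hA2 : dA2.getD k [] = PySem.List.sorted (dA.getD k []) ts := by
      rw [hdA2, phase3_getD (fun ls => PySem.List.sorted ls ts) [] dA.keys dA k hnodA]
      simp [hkA]
    have hAg : dA.getD k [] = flat.filter (fun x => svc x == k) := by
      rw [hdA, getD_group svc flat PySem.Dict.empty k]
      rfl
    have h0 : d0.getD k [] = [] := by
      rw [hd0]; exact getD_seed_nil svc flat PySem.Dict.empty (fun c => rfl) k
    have hBg : dB.getD k [] = (PySem.List.sorted flat ts).filter (fun x => svc x == k) := by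
      rw [hdB, getD_group svc _ d0 k, h0, List.nil_append]
    rw [hA2, hAg, hBg, sorted_filter_comm ts (fun x => svc x == k) flat]
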